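-- pv_equiv track=rewrite | github.com/SimJunYou/CS3245-HW3 | InputOutput.py | serialize_posting
-- ===== SOURCE A (Python) =====
-- from math import floor, sqrt
--
-- def serialize_posting(posting_list, write_skips):
--     """
--     Turns a posting list into a string, and returns the string.
--     The string format is: "(freq)$(id1),(id2^skip),(...),(idn)|".
--     Skip denotes how many characters to skip to get to the next number.
--     The "|" is the terminator character for the serialization.
--     """
--     posting_list = sorted(list(posting_list))
--     doc_freq = str(len(posting_list))
--
--     if write_skips:
--         # convert to posting list with skips, then convert the skips to string form
--         posting_list = add_skips_to_posting(posting_list)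
--         for i, item in enumerate(posting_list):
--             if isinstance(item, tuple):
--                 posting_list[i] = f"{item[0]}^{item[1]}"
--
--     doc_ids = ",".join(map(str, posting_list))
--     output = f"{doc_freq}${doc_ids}|"
--     return output
--
-- def add_skips_to_posting(posting_list):
--     """
--     Adds skip pointers to existing posting list.
--     Changes existing doc id items into (doc id, skip interval) tuple.
--     Returns new posting list.
--     Does not do anything if list length is below 4!
--     """
--     # posting list should have at least 4 elements for skip pointers to be efficient
--     if len(posting_list) < 4:
--         return posting_list
--
--     # calculate the last index which should contain a skip
--     size = len(posting_list)
--     skip_interval = floor(sqrt(size))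
--     last_skip = (size - 1) - skip_interval
--     last_skip = last_skip - (last_skip % skip_interval)
--
--     for i, doc_id in enumerate(posting_list):
--         if i <= last_skip and i % skip_interval == 0:
--             posting_list[i] = (doc_id, skip_interval)
--     return posting_list
-- ===== SOURCE B (Python) =====
-- from math import floor, sqrt
--
-- def serialize_posting(posting_list, write_skips):
--     docs = sorted(posting_list)
--     n = len(docs)
--     if write_skips and n >= 4:
--         k = floor(sqrt(n))
--         last_skip = (n - 1) - k
--         last_skip -= last_skip % k
--         # block traversal: jump from skip position to skip position, slicing
--         # out each block's tail as plain ids -- no per-element index test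
--         parts = []
--         j = 0
--         while j <= last_skip:
--             parts.append(f"{docs[j]}^{k}")
--             parts.extend(map(str, docs[j + 1:j + k]))
--             j += k
--         parts.extend(map(str, docs[last_skip + k:]))
--     else:
--         parts = [str(d) for d in docs]
--     return f"{n}${','.join(parts)}|"
-- ===== Notes on version B (the rewrite author's own statement) =====
-- stated objective: alternative
-- what changed: B replaces A's per-element tagging (enumerate every index and test i % skip_interval == 0, via a tuple list rewritten in two further passes) by a block traversal: it jumps directly from one skip position to the next (j += k), emitting the tagged head and slicing out each block's tail of plain ids, so no index is ever tested.
import Mathlib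
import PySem

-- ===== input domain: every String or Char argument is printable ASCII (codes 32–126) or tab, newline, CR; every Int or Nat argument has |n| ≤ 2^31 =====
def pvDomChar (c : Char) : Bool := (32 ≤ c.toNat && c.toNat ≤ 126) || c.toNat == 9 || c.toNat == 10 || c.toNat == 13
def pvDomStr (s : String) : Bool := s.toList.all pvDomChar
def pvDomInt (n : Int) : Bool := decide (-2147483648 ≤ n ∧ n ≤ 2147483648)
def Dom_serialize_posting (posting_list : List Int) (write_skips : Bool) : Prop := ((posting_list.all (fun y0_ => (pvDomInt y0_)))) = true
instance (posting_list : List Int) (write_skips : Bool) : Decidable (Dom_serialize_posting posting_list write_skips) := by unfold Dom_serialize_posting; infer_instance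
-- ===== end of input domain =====

-- ===== PORT A =====
-- B walks the list block by block (jumping j += skip_interval) instead of testing every index; objective: alternative decomposition, same cost.
-- floor(sqrt(size)) is ported as Nat.sqrt, exact for Nat list lengths.
-- helper add_skips_to_posting: tagged entries become Sum.inr (doc_id, skip), untouched ones Sum.inl doc_id
def add_skips_to_posting (posting_list : List Int) : List (Sum Int (Int × Int)) :=
  if posting_list.length < 4 then posting_list.map Sum.inl
  else
    let size := posting_list.length
    let skip_interval := Nat.sqrt size
    let last_skip0 := (size - 1) - skip_interval
    let last_skip := last_skip0 - last_skip0 % skip_interval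
    (PySem.List.enumerate posting_list 0).map (fun p =>
      if p.1 ≤ (last_skip : Int) ∧ PySem.Int.mod p.1 (skip_interval : Int) = 0 then
        Sum.inr (p.2, (skip_interval : Int))
      else Sum.inl p.2)

def serialize_posting (posting_list : List Int) (write_skips : Bool) : String :=
  let posting_list := PySem.List.sorted posting_list (fun x => x) false
  let doc_freq := PySem.Int.toStr posting_list.length
  let items : List String :=
    if write_skips then
      -- the enumerate loop rewriting tuples to "id^skip" strings (ints left alone), then map(str, ...)
      let mixed := (add_skips_to_posting posting_list).map (fun it =>
        match it with
        | Sum.inr (d, s) => Sum.inl (PySem.Int.toStr d ++ "^" ++ PySem.Int.toStr s)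
        | Sum.inl d => Sum.inr d)
      mixed.map (fun it => match it with
        | Sum.inl s => s            -- str of a str is itself
        | Sum.inr d => PySem.Int.toStr d)
    else posting_list.map PySem.Int.toStr
  let doc_ids := PySem.Str.join "," items
  doc_freq ++ "$" ++ doc_ids ++ "|"

-- ===== PORT B =====
-- the while loop of Source B: one call per block; k is passed as k-1 (k = k1+1 ≥ 2 always) so termination is structural.
-- docs[j] is always in range (j ≤ last_skip < len docs), ported as pyGetD with default 0.
def pvBlocks (docs : List Int) (k1 : Nat) (L : Nat) (j : Nat) : List String :=
  if _h : j ≤ L then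
    (PySem.Int.toStr (PySem.List.pyGetD docs (j : Int) 0) ++ "^" ++ PySem.Int.toStr ((k1 : Int) + 1))
      :: (PySem.List.slice docs (some ((j : Int) + 1)) (some ((j : Int) + ((k1 : Int) + 1)))).map PySem.Int.toStr
      ++ pvBlocks docs k1 L (j + (k1 + 1))
  else []
termination_by L + 1 - j
decreasing_by omega

def serialize_posting_alt (posting_list : List Int) (write_skips : Bool) : String :=
  let docs := PySem.List.sorted posting_list (fun x => x) false
  let n := docs.length
  let parts : List String :=
    if write_skips ∧ 4 ≤ n then
      let k := Nat.sqrt n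
      let last_skip0 := (n - 1) - k
      let last_skip := last_skip0 - last_skip0 % k
      pvBlocks docs (k - 1) last_skip 0
        ++ (PySem.List.slice docs (some ((last_skip + k : Nat) : Int)) none).map PySem.Int.toStr
    else docs.map PySem.Int.toStr
  PySem.Int.toStr (n : Int) ++ "$" ++ PySem.Str.join "," parts ++ "|"

-- ===== PRECONDITION & SPEC =====
def Spec_serialize_posting (posting_list : List Int) (write_skips : Bool) (out : String) : Prop := out = serialize_posting_alt posting_list write_skips
instance (posting_list : List Int) (write_skips : Bool) (out : String) : Decidable (Spec_serialize_posting posting_list write_skips out) := by unfold Spec_serialize_posting; infer_instance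

-- ===== CLAIM (what is proved, stated in full; the proofs are below) =====
def Claim_equal_serialize_posting : Prop := ∀ (posting_list : List Int) (write_skips : Bool), Dom_serialize_posting posting_list write_skips → Spec_serialize_posting posting_list write_skips (serialize_posting posting_list write_skips)

-- ===== LEMMAS AND PROOFS =====

-- between two aligned skip positions no index is divisible by k
lemma pv_no_tag_between (k j i : Nat) (hj : j % k = 0) (h1 : j < i) (h2 : i < j + k) :
    i % k ≠ 0 := by
  intro hi
  have hdj : k ∣ j := Nat.dvd_of_mod_eq_zero hj
  have hdi : k ∣ i := Nat.dvd_of_mod_eq_zero hi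
  have hd : k ∣ i - j := Nat.dvd_sub hdi hdj
  have h4 : 0 < i - j := by omega
  exact absurd (Nat.le_of_dvd h4 hd) (by omega)

-- a stretch of plain (untagged) indices: mapping the tagging test over pyRange a b is just the slice
lemma pv_plain_range (docs : List Int) (L k a b : Nat) (hb : b ≤ docs.length)
    (hplain : ∀ i : Nat, a ≤ i → i < b → ¬(i ≤ L ∧ i % k = 0)) :
    (PySem.List.pyRange (a : Int) (b : Int) 1).map
      (fun i => if i ≤ (L : Int) ∧ PySem.Int.mod i (k : Int) = 0
        then PySem.Int.toStr (PySem.List.pyGetD docs i 0) ++ "^" ++ PySem.Int.toStr (k : Int)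
        else PySem.Int.toStr (PySem.List.pyGetD docs i 0))
    = ((docs.drop a).take (b - a)).map PySem.Int.toStr := by
  by_cases hba : b ≤ a
  · rw [PySem.List.pyRange_one_eq_nil (by exact_mod_cast hba)]
    simp [Nat.sub_eq_zero_of_le hba]
  · rw [PySem.List.pyRange_one]
    have htn : (((b : Int)) - ((a : Int))).toNat = b - a := by omega
    rw [htn, List.map_map]
    have key : ∀ t ∈ List.range (b - a),
        ((fun i => if i ≤ (L : Int) ∧ PySem.Int.mod i (k : Int) = 0
            then PySem.Int.toStr (PySem.List.pyGetD docs i 0) ++ "^" ++ PySem.Int.toStr (k : Int)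
            else PySem.Int.toStr (PySem.List.pyGetD docs i 0)) ∘ (fun t : Nat => (a : Int) + t)) t
          = PySem.Int.toStr (docs.getD (a + t) 0) := by
      intro t ht
      simp only [List.mem_range] at ht
      simp only [Function.comp_apply]
      have hcast : (a : Int) + (t : Int) = ((a + t : Nat) : Int) := by push_cast; ring
      rw [hcast, PySem.List.pyGetD_natCast, PySem.Int.mod_natCast]
      rw [if_neg]
      rintro ⟨h1, h2⟩
      exact hplain (a + t) (Nat.le_add_right _ _) (by omega)
        ⟨by exact_mod_cast h1, by exact_mod_cast h2⟩
    rw [List.map_congr_left key]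
    have hlist : (docs.drop a).take (b - a)
        = (List.range (b - a)).map (fun t => docs.getD (a + t) 0) := by
      apply List.ext_getElem
      · simp; omega
      · intro i h1 h2
        have hlen : i < b - a := by simpa using h2
        have hia : a + i < docs.length := by omega
        simp only [List.getElem_take, List.getElem_drop, List.getElem_map, List.getElem_range]
        rw [List.getD_eq_getElem _ _ hia]
    rw [hlist, List.map_map]
    rfl

-- block walk of B = tagged map over the index range of A, from any aligned block start j
lemma pv_blocks_eq (docs : List Int) (n k L : Nat)
    (hn : docs.length = n) (hk : 2 ≤ k) (hL : L % k = 0) (hLn : L + k ≤ n)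
    (j : Nat) (hj1 : j % k = 0) (hj2 : j ≤ L) :
    pvBlocks docs (k - 1) L j
      ++ (PySem.List.slice docs (some ((L + k : Nat) : Int)) none).map PySem.Int.toStr
    = (PySem.List.pyRange (j : Int) (n : Int) 1).map
      (fun i => if i ≤ (L : Int) ∧ PySem.Int.mod i (k : Int) = 0
        then PySem.Int.toStr (PySem.List.pyGetD docs i 0) ++ "^" ++ PySem.Int.toStr (k : Int)
        else PySem.Int.toStr (PySem.List.pyGetD docs i 0)) := by
  have hjn : j < n := by omega
  rw [pvBlocks, dif_pos hj2]
  have hk1 : k - 1 + 1 = k := by omega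
  have hcast1 : ((k - 1 : Nat) : Int) + 1 = (k : Int) := by omega
  have hcastj1 : (j : Int) + 1 = ((j + 1 : Nat) : Int) := by push_cast; ring
  rw [hcast1, hcastj1]
  have hcastjk : (j : Int) + (k : Int) = ((j + k : Nat) : Int) := by push_cast; ring
  rw [hcastjk, PySem.List.slice_natCast, hk1]
  -- split the range: head j, plain stretch (j+1, j+k), rest from j+k
  rw [PySem.List.pyRange_one_cons (show (j : Int) < (n : Int) by exact_mod_cast hjn)]
  have hsplit : PySem.List.pyRange ((j : Int) + 1) (n : Int) 1
      = PySem.List.pyRange ((j + 1 : Nat) : Int) ((j + k : Nat) : Int) 1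
        ++ PySem.List.pyRange ((j + k : Nat) : Int) (n : Int) 1 := by
    rw [← hcastj1]
    exact PySem.List.pyRange_one_append _ _ _ (by push_cast; omega) (by push_cast; omega)
  rw [hsplit, List.map_cons, List.map_append]
  -- head is tagged
  rw [if_pos ⟨by exact_mod_cast hj2, by simp [PySem.Int.mod_natCast, hj1]⟩]
  -- middle stretch is plain
  have hmid := pv_plain_range docs L k (j + 1) (j + k) (by omega)
    (fun i hi1 hi2 hc => pv_no_tag_between k j i hj1 (by omega) (by omega) hc.2)
  rw [hmid]
  have hmidlen : j + k - (j + 1) = k - 1 := by omega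
  rw [hmidlen]
  rcases Nat.lt_or_ge L (j + k) with hlast | hrec
  · -- j is the last skip position: j = L, the walker stops, the rest is plain
    have hjL : j = L := by
      have hd : k ∣ L - j := Nat.dvd_sub (Nat.dvd_of_mod_eq_zero hL) (Nat.dvd_of_mod_eq_zero hj1)
      rcases Nat.eq_zero_or_pos (L - j) with h0 | hpos
      · omega
      · exact absurd (Nat.le_of_dvd hpos hd) (by omega)
    subst hjL
    rw [pvBlocks, dif_neg (by omega)]
    have htail := pv_plain_range docs j k (j + k) n (by omega)
      (fun i hi1 hi2 hc => by
        rcases hc with ⟨hc1, _⟩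
        omega)
    rw [htail, PySem.List.slice_from_natCast]
    have hdrop : (docs.drop (j + k)).take (n - (j + k)) = docs.drop (j + k) := by
      apply List.take_of_length_le
      simp [hn]
    rw [hdrop]
    simp
  · -- another block follows
    have htail := pv_blocks_eq docs n k L hn hk hL hLn (j + k)
      (by rw [Nat.add_mod_right]; exact hj1) hrec
    simp only [List.cons_append, List.append_assoc, htail]
termination_by L - j
decreasing_by omega

-- the write_skips branch, over the (sorted) list and named n/k/L
lemma pv_join_true (docs : List Int) (n k L : Nat)
    (hn : docs.length = n) (hk : k = Nat.sqrt n) (hL : L = (n - 1 - k) - (n - 1 - k) % k) :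
    ((add_skips_to_posting docs).map (fun it =>
        match it with
        | Sum.inr (d, s) => Sum.inl (PySem.Int.toStr d ++ "^" ++ PySem.Int.toStr s)
        | Sum.inl d => Sum.inr d)).map
      (fun it => match it with
        | Sum.inl s => s
        | Sum.inr d => PySem.Int.toStr d)
    = (if 4 ≤ n then
        pvBlocks docs (k - 1) L 0
          ++ (PySem.List.slice docs (some ((L + k : Nat) : Int)) none).map PySem.Int.toStr
      else docs.map PySem.Int.toStr) := by
  rcases Nat.lt_or_ge n 4 with h4 | h4
  · rw [if_neg (by omega)]
    unfold add_skips_to_posting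
    rw [if_pos (by omega)]
    simp only [List.map_map]
    exact List.map_congr_left fun x _ => rfl
  · rw [if_pos h4]
    have hk2 : 2 ≤ k := by rw [hk, Nat.le_sqrt]; omega
    have hkk : k + k ≤ n := by
      have h1 : k * k ≤ n := by
        rw [hk]
        nlinarith [Nat.sqrt_le' n]
      calc k + k ≤ k * k := Nat.add_le_mul hk2 hk2
        _ ≤ n := h1
    have hLmod : L % k = 0 := by
      have hdm := Nat.div_add_mod (n - 1 - k) k
      have hLe : L = k * ((n - 1 - k) / k) := by omega
      rw [hLe, Nat.mul_mod_right]
    have hLn : L + k ≤ n := by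
      have : L ≤ n - 1 - k := by omega
      omega
    unfold add_skips_to_posting
    rw [if_neg (by omega)]
    simp only [hn, ← hk, ← hL, List.map_map]
    refine Eq.trans (List.map_congr_left
      (g := fun p : Int × Int =>
        if p.1 ≤ (L : Int) ∧ PySem.Int.mod p.1 (k : Int) = 0
        then PySem.Int.toStr p.2 ++ "^" ++ PySem.Int.toStr (k : Int)
        else PySem.Int.toStr p.2)
      (fun p _ => by
        by_cases hc : p.1 ≤ (L : Int) ∧ PySem.Int.mod p.1 (k : Int) = 0
        · simp [hc]
        · simp [hc])) ?_
    rw [PySem.List.enumerate_eq_map_pyRange docs 0, List.map_map]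
    have hlenInt : PySem.List.len docs = (n : Int) := by
      simp [PySem.List.len, hn]
    rw [hlenInt]
    have hfun : ((fun p : Int × Int =>
          if p.1 ≤ (L : Int) ∧ PySem.Int.mod p.1 (k : Int) = 0
          then PySem.Int.toStr p.2 ++ "^" ++ PySem.Int.toStr (k : Int)
          else PySem.Int.toStr p.2) ∘
        (fun j => (j, PySem.List.pyGetD docs j 0)))
        = (fun i => if i ≤ (L : Int) ∧ PySem.Int.mod i (k : Int) = 0
            then PySem.Int.toStr (PySem.List.pyGetD docs i 0) ++ "^" ++ PySem.Int.toStr (k : Int)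
            else PySem.Int.toStr (PySem.List.pyGetD docs i 0)) := rfl
    rw [hfun]
    have hb := pv_blocks_eq docs n k L hn hk2 hLmod hLn 0 (Nat.zero_mod k) (Nat.zero_le L)
    rw [Nat.cast_zero] at hb
    exact hb.symm

-- ===== VERDICT (by name: the statement is the Claim_ definition above) =====
theorem serialize_posting_spec : Claim_equal_serialize_posting := by
  intro posting_list write_skips _
  unfold Spec_serialize_posting serialize_posting serialize_posting_alt
  cases write_skips with
  | false => simp
  | true =>
    simp only [if_true, true_and, PySem.List.length_sorted]
    have hjoin := pv_join_true (PySem.List.sorted posting_list (fun x => x) false)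
      posting_list.length (Nat.sqrt posting_list.length)
      ((posting_list.length - 1 - Nat.sqrt posting_list.length)
        - (posting_list.length - 1 - Nat.sqrt posting_list.length) % Nat.sqrt posting_list.length)
      (PySem.List.length_sorted _ _ _) rfl rfl
    rw [hjoin]
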